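-- pv_equiv track=rewrite | github.com/anhtuluke79/3mbot | handlers/xien.py | format_xien_result
-- ===== SOURCE A (Python) =====
-- from typing import List, Iterable, Tuple
--
-- def format_xien_result(combos: List[Tuple[str, ...]]) -> str:
--     """
--     Định dạng kết quả ghép xiên (kiểu cũ):
--     - Các số trong một tổ hợp ngăn cách bằng '&'
--     - Các tổ hợp ngăn cách bằng ', '
--     - Sau mỗi 20 tổ hợp thì xuống dòng
--     """
--     if not combos:
--         return "❗ Không đủ số để ghép xiên."
--     formatted = ["&".join(combo) for combo in combos]
--     lines = []
--     for i in range(0, len(formatted), 20):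
--         chunk = formatted[i:i+20]
--         lines.append(", ".join(chunk))
--     result = "*Kết quả tổ hợp xiên:*\n" + "\n".join(lines)
--     return result
-- ===== SOURCE B (Python) =====
-- def format_xien_result(combos):
--     if not combos:
--         return "❗ Không đủ số để ghép xiên."
--     out = "*Kết quả tổ hợp xiên:*\n"
--     for i, combo in enumerate(combos):
--         if i > 0:
--             out += "\n" if i % 20 == 0 else ", "
--         out += "&".join(combo)
--     return out
-- ===== Notes on version B (the rewrite author's own statement) =====
-- stated objective: simpler
-- what changed: B builds the result in one pass over the combos, choosing the separator (none / newline every 20th / comma) per index, instead of A's intermediate formatted list, range-with-step-20 slicing into chunks, and two nested join passes.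
import Mathlib
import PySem

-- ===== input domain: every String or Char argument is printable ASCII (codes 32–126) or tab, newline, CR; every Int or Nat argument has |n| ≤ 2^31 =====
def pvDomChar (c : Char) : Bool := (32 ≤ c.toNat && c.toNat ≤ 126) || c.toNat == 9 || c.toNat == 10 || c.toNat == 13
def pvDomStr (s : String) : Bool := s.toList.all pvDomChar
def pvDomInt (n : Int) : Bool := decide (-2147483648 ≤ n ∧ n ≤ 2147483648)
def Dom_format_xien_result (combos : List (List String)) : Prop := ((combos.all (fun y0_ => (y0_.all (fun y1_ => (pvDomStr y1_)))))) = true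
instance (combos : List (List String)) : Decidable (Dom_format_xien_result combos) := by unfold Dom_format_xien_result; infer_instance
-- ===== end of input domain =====

-- B replaces A's chunk list + step-20 range slicing with a single indexed pass choosing each item's separator (simpler decomposition; same output).


-- ===== PORT A =====
def format_xien_result (combos : List (List String)) : String :=
  if combos = [] then "❗ Không đủ số để ghép xiên."
  else
    let formatted := combos.map (fun combo => PySem.Str.join "&" combo)
    let lines := (PySem.List.pyRange 0 (formatted.length : Int) 20).foldl
      (fun lines i =>
        lines ++ [PySem.Str.join ", " (PySem.List.slice formatted (some i) (some (i + 20)))]) []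
    "*Kết quả tổ hợp xiên:*\n" ++ PySem.Str.join "\n" lines

-- ===== PORT B =====
def fxSep (i : Nat) : String := if i = 0 then "" else if i % 20 = 0 then "\n" else ", "

def fxGo : String → Nat → List (List String) → String
  | acc, _, [] => acc
  | acc, i, combo :: rest => fxGo (acc ++ fxSep i ++ PySem.Str.join "&" combo) (i + 1) rest

def format_xien_result_alt (combos : List (List String)) : String :=
  if combos = [] then "❗ Không đủ số để ghép xiên."
  else fxGo "*Kết quả tổ hợp xiên:*\n" 0 combos

-- ===== PRECONDITION & SPEC =====
def Spec_format_xien_result (combos : List (List String)) (out : String) : Prop := out = format_xien_result_alt combos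
instance (combos : List (List String)) (out : String) : Decidable (Spec_format_xien_result combos out) := by unfold Spec_format_xien_result; infer_instance

-- ===== CLAIM (what is proved, stated in full; the proofs are below) =====
def Claim_equal_format_xien_result : Prop := ∀ (combos : List (List String)), Dom_format_xien_result combos → Spec_format_xien_result combos (format_xien_result combos)

-- ===== LEMMAS AND PROOFS =====

-- A's chunk structure: the lines list, as a recursion on the formatted list.
def chunkLines (xs : List String) : List String :=
  if h : xs = [] then [] else PySem.Str.join ", " (xs.take 20) :: chunkLines (xs.drop 20)
  termination_by xs.length
  decreasing_by
    cases xs with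
    | nil => exact absurd rfl h
    | cons a t => simp only [List.length_drop, List.length_cons]; omega

lemma chunkLines_nil : chunkLines [] = [] := by unfold chunkLines; rfl

lemma chunkLines_eq (xs : List String) (h : xs ≠ []) :
    chunkLines xs = PySem.Str.join ", " (xs.take 20) :: chunkLines (xs.drop 20) := by
  conv_lhs => unfold chunkLines
  rw [dif_neg h]

lemma chunkLines_ne_nil (xs : List String) (h : xs ≠ []) : chunkLines xs ≠ [] := by
  rw [chunkLines_eq xs h]; simp

lemma pyRange20_nil (a b : Int) (h : b ≤ a) : PySem.List.pyRange a b 20 = [] := by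
  rw [PySem.List.pyRange_of_pos a b (by norm_num)]
  simp [not_lt.mpr h]

lemma pyRange20_cons (a b : Int) (h : a < b) :
    PySem.List.pyRange a b 20 = a :: PySem.List.pyRange (a + 20) b 20 := by
  rw [PySem.List.pyRange_of_pos a b (by norm_num), PySem.List.pyRange_of_pos (a + 20) b (by norm_num)]
  have hcnt : ((b - a + 20 - 1) / 20).toNat
      = (if a + 20 < b then ((b - (a + 20) + 20 - 1) / 20).toNat else 0) + 1 := by
    split_ifs <;> omega
  rw [if_pos h, hcnt, List.range_succ_eq_map, List.map_cons, List.map_map]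
  have hfun : ((fun k : Nat => a + 20 * (k : Int)) ∘ Nat.succ) = fun k : Nat => a + 20 + 20 * (k : Int) := by
    funext k
    simp only [Function.comp_apply]
    push_cast
    ring
  rw [hfun]
  congr 1
  push_cast
  ring

lemma strJoin_singleton (s x : String) : PySem.Str.join s [x] = x := by
  apply String.toList_inj.mp
  rw [PySem.Str.toList_join]
  simp [PySem.Chars.join_singleton]

lemma strJoin_cons_cons (s x y : String) (t : List String) :
    PySem.Str.join s (x :: y :: t) = x ++ s ++ PySem.Str.join s (y :: t) := by
  apply String.toList_inj.mp
  rw [String.toList_append, String.toList_append, PySem.Str.toList_join, PySem.Str.toList_join]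
  simp [PySem.Chars.join_cons_cons]

-- A's line loop computes chunkLines of the remaining suffix.
lemma A_loop (m : Nat) (fmt : List String) (k : Nat) (hm : fmt.length - k ≤ m) (acc : List String) :
    (PySem.List.pyRange (k : Int) (fmt.length : Int) 20).foldl
      (fun lines i =>
        lines ++ [PySem.Str.join ", " (PySem.List.slice fmt (some i) (some (i + 20)))]) acc
    = acc ++ chunkLines (fmt.drop k) := by
  induction m generalizing k acc with
  | zero =>
    have hk : fmt.length ≤ k := by omega
    rw [pyRange20_nil _ _ (by exact_mod_cast hk), List.drop_eq_nil_of_le hk, chunkLines_nil]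
    simp
  | succ m ih =>
    by_cases hk : fmt.length ≤ k
    · rw [pyRange20_nil _ _ (by exact_mod_cast hk), List.drop_eq_nil_of_le hk, chunkLines_nil]
      simp
    · rw [not_le] at hk
      rw [pyRange20_cons _ _ (by exact_mod_cast hk), List.foldl_cons]
      have h20 : ((k : Int) + 20) = ((k : Int) + ((20 : Nat) : Int)) := by norm_num
      rw [h20, PySem.List.slice_natCast_add]
      have hkk : ((k : Int) + ((20 : Nat) : Int)) = (((k + 20 : Nat) : Int)) := by push_cast; ring
      rw [hkk, ih (k + 20) (by omega)]
      have hne : fmt.drop k ≠ [] := by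
        intro hc
        have := congrArg List.length hc
        simp only [List.length_drop, List.length_nil] at this
        omega
      rw [chunkLines_eq (fmt.drop k) hne]
      have hdd : (fmt.drop k).drop 20 = fmt.drop (k + 20) := by
        rw [List.drop_drop]
      rw [hdd]
      simp
-- B's pass, with the per-item "&".join already applied (proof-side mirror of fxGo over the formatted strings).
def fxGoS : String → Nat → List String → String
  | acc, _, [] => acc
  | acc, i, x :: rest => fxGoS (acc ++ fxSep i ++ x) (i + 1) rest

lemma fxGo_eq (cs : List (List String)) (acc : String) (i : Nat) :
    fxGo acc i cs = fxGoS acc i (cs.map (fun combo => PySem.Str.join "&" combo)) := by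
  induction cs generalizing acc i with
  | nil => simp [fxGo, fxGoS]
  | cons c t ih => simp [fxGo, fxGoS, ih]

-- Within a chunk every appended separator is ", ".
def commaCat : List String → String
  | [] => ""
  | x :: t => ", " ++ x ++ commaCat t

lemma fxGoS_append (xs ys : List String) (acc : String) (i : Nat) :
    fxGoS acc i (xs ++ ys) = fxGoS (fxGoS acc i xs) (i + xs.length) ys := by
  induction xs generalizing acc i with
  | nil => simp [fxGoS]
  | cons x t ih => simp [fxGoS, ih, Nat.add_assoc, Nat.add_comm 1]

lemma fxGoS_inner (c : List String) (acc : String) (i : Nat)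
    (h1 : 0 < i % 20) (h2 : i % 20 + c.length ≤ 20) :
    fxGoS acc i c = acc ++ commaCat c := by
  induction c generalizing acc i with
  | nil => simp [fxGoS, commaCat]
  | cons x t ih =>
    have hsep : fxSep i = ", " := by
      unfold fxSep
      rw [if_neg (by omega), if_neg (by omega)]
    rw [fxGoS, hsep]
    cases t with
    | nil => simp [fxGoS, commaCat, String.append_assoc]
    | cons y t' =>
      rw [ih _ (i + 1) (by simp only [List.length_cons] at h2; omega)
          (by simp only [List.length_cons] at h2 ⊢; omega)]
      simp [commaCat, String.append_assoc]

lemma commaCat_join (t : List String) (x : String) :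
    x ++ commaCat t = PySem.Str.join ", " (x :: t) := by
  induction t generalizing x with
  | nil => rw [commaCat, strJoin_singleton, String.append_empty]
  | cons y t ih =>
    rw [commaCat, strJoin_cons_cons, ← ih y]
    simp [String.append_assoc]

lemma fxGoS_chunk (x : String) (t : List String) (acc : String) (i : Nat)
    (ht : t.length ≤ 19) (hi : i % 20 = 0) :
    fxGoS acc i (x :: t) = acc ++ fxSep i ++ PySem.Str.join ", " (x :: t) := by
  rw [fxGoS, fxGoS_inner t _ (i + 1) (by omega) (by omega), ← commaCat_join]
  simp [String.append_assoc]

lemma fxGoS_main (m : Nat) (xs : List String) (acc : String) (i : Nat)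
    (hm : xs.length ≤ m) (hi : i % 20 = 0) :
    fxGoS acc i xs
      = acc ++ (if xs = [] then "" else fxSep i ++ PySem.Str.join "\n" (chunkLines xs)) := by
  induction m generalizing xs acc i with
  | zero =>
    have : xs = [] := by cases xs <;> simp_all
    subst this; simp [fxGoS]
  | succ m ih =>
    cases xs with
    | nil => simp [fxGoS]
    | cons c cs =>
      rw [if_neg (by simp)]
      have htake : List.take 20 (c :: cs) = c :: List.take 19 cs := rfl
      have hdrop : List.drop 20 (c :: cs) = List.drop 19 cs := rfl
      have hsplit : c :: cs = List.take 20 (c :: cs) ++ List.drop 20 (c :: cs) :=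
        (List.take_append_drop 20 (c :: cs)).symm
      conv_lhs => rw [hsplit]
      rw [fxGoS_append, htake, hdrop]
      rw [fxGoS_chunk c (List.take 19 cs) acc i (by simp only [List.length_take]; omega) hi]
      by_cases hlen : cs.length ≤ 19
      · have hd : List.drop 19 cs = [] := List.drop_eq_nil_of_le hlen
        rw [hd, fxGoS]
        rw [chunkLines_eq (c :: cs) (by simp), hdrop, hd, chunkLines_nil, htake]
        have h19 : List.take 19 cs = cs := List.take_of_length_le hlen
        rw [h19, strJoin_singleton]
        simp [String.append_assoc]
      · rw [not_le] at hlen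
        have hd : List.drop 19 cs ≠ [] := by
          intro hc
          have := congrArg List.length hc
          simp only [List.length_drop, List.length_nil] at this
          omega
        have hl20 : i + (c :: List.take 19 cs).length = i + 20 := by
          simp only [List.length_cons, List.length_take]
          omega
        rw [hl20, ih (List.drop 19 cs) _ (i + 20)
            (by simp only [List.length_drop]
                simp only [List.length_cons] at hm
                omega)
            (by omega), if_neg hd]
        have hsep20 : fxSep (i + 20) = "\n" := by
          unfold fxSep
          rw [if_neg (by omega), if_pos (by omega)]
        rw [hsep20, chunkLines_eq (c :: cs) (by simp), hdrop]
        obtain ⟨y, rest, hyr⟩ := List.exists_cons_of_ne_nil (chunkLines_ne_nil _ hd)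
        rw [hyr, strJoin_cons_cons, ← hyr]
        simp [String.append_assoc]

-- ===== VERDICT (by name: the statement is the Claim_ definition above) =====
theorem format_xien_result_spec : Claim_equal_format_xien_result := by
  intro combos _
  unfold Spec_format_xien_result format_xien_result format_xien_result_alt
  by_cases h : combos = []
  · simp [h]
  · rw [if_neg h, if_neg h]
    show "*Kết quả tổ hợp xiên:*\n" ++ PySem.Str.join "\n"
        ((PySem.List.pyRange 0 (((combos.map (fun combo => PySem.Str.join "&" combo)).length : Nat) : Int) 20).foldl
          (fun lines i =>
            lines ++ [PySem.Str.join ", " (PySem.List.slice (combos.map (fun combo => PySem.Str.join "&" combo)) (some i) (some (i + 20)))]) [])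
      = fxGo "*Kết quả tổ hợp xiên:*\n" 0 combos
    rw [fxGo_eq]
    set fmt := combos.map (fun combo => PySem.Str.join "&" combo) with hfmt
    have hfne : fmt ≠ [] := by simp [hfmt, h]
    have hA := A_loop fmt.length fmt 0 (by omega) []
    simp only [Nat.cast_zero, List.drop_zero, List.nil_append] at hA
    rw [hA]
    rw [fxGoS_main fmt.length fmt _ 0 le_rfl (by omega), if_neg hfne]
    have hsep0 : fxSep 0 = "" := rfl
    rw [hsep0]
    simp
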